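-- pv_equiv track=rewrite | github.com/previoip/aoc | 2025/d06.py | parseinstr
-- ===== SOURCE A (Python) =====
-- def parseinstr(inp):
--   lines = inp.splitlines()
--   oprs = lines[-1]
--   j = 0
--   for i in range(len(oprs)):
--     if i != 0 and oprs[i] != ' ':
--       yield [lines[k][j:i] for k in range(len(lines))]
--       j = i
--   i = len(oprs)
--   yield [lines[k][j:i] for k in range(len(lines))]
-- ===== SOURCE B (Python) =====
-- def parseinstr(inp):
--   lines = inp.splitlines()
--   oprs = lines[-1]
--   while True:
--     w = 1
--     while w < len(oprs) and oprs[w] == ' ':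
--       w += 1
--     if w >= len(oprs):
--       yield [ln[:len(oprs)] for ln in lines]
--       return
--     yield [ln[:w] for ln in lines]
--     lines = [ln[w:] for ln in lines]
--     oprs = oprs[w:]
-- ===== Notes on version B (the rewrite author's own statement) =====
-- stated objective: alternative
-- what changed: B consumes the input: it scans the last line for the width of the first column group, yields the prefixes of all lines, chops that prefix off every line (including the last), and repeats on the shortened lines, instead of A's single indexed scan over the fixed text that carries the previous cut position j and slices the original lines at [j:i].
-- outside the precondition, e.g. on parseinstr(''): A raises IndexError, B raises IndexError
import Mathlib
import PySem

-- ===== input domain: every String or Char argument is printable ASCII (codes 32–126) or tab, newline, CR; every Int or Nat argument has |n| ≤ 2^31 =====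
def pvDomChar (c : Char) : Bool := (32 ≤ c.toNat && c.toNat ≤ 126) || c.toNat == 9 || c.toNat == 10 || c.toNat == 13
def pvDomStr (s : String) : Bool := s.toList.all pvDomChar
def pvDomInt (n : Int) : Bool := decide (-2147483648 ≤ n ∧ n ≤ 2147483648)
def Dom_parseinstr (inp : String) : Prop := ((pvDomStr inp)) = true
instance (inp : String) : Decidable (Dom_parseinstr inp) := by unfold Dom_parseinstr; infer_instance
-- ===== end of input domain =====

-- B replaces A's index scan over the fixed text (yield slice [j:i] at every cut of the
-- last line) by a consuming recursion: it scans for the width of the FIRST column group,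
-- yields the prefixes, chops that prefix off every line, and recurses on the shortened
-- lines; objective: alternative decomposition, same cost.

-- ===== PORT A =====
def parseinstr (inp : String) : List (List String) :=
  let lines := PySem.Str.splitlines inp
  match PySem.List.pyGet? lines (-1) with
  | none => []   -- Python raises IndexError here (inp = ""); excluded by Pre_parseinstr
  | some oprs =>
    let st := (PySem.List.pyRange 0 (PySem.Str.len oprs) 1).foldl
      (fun (s : Int × List (List String)) i =>
        if i ≠ 0 ∧ PySem.Str.pyGet? oprs i ≠ some ' ' then
          (i, s.2 ++ [(PySem.List.pyRange 0 (PySem.List.len lines) 1).map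
            (fun k => PySem.Str.slice (PySem.List.pyGetD lines k "") (some s.1) (some i))])
        else s) (0, [])
    st.2 ++ [(PySem.List.pyRange 0 (PySem.List.len lines) 1).map
      (fun k => PySem.Str.slice (PySem.List.pyGetD lines k "") (some st.1) (some (PySem.Str.len oprs)))]

-- ===== PORT B =====
-- the inner `w = 1; while w < len(oprs) and oprs[w] == ' ': w += 1` scan:
-- w stops at 1 + (number of leading spaces of oprs[1:]) — exact, ported as takeWhile.
def pvFindW (cs : List Char) : Nat := 1 + ((cs.drop 1).takeWhile (fun c => c == ' ')).length

-- the outer `while True` loop of Source B: yield first block, chop it off, repeat.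
def pvGo (lines : List String) (cs : List Char) : List (List String) :=
  if _h : cs.length ≤ pvFindW cs then
    [lines.map (fun ln => PySem.Str.slice ln none (some (cs.length : Int)))]
  else
    lines.map (fun ln => PySem.Str.slice ln none (some (pvFindW cs : Int)))
      :: pvGo (lines.map (fun ln => PySem.Str.slice ln (some (pvFindW cs : Int)) none))
              (cs.drop (pvFindW cs))
termination_by cs.length
decreasing_by
  have hw : 1 ≤ pvFindW cs := Nat.le_add_right 1 _
  simp only [List.length_drop]
  omega

def parseinstr_alt (inp : String) : List (List String) :=
  let lines := PySem.Str.splitlines inp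
  match PySem.List.pyGet? lines (-1) with
  | none => []   -- Python raises IndexError here (inp = ""); excluded by Pre_parseinstr
  | some oprs => pvGo lines oprs.toList   -- oprs[w:]/oprs[:w] tracked on the code points

-- ===== PRECONDITION & SPEC =====
-- Pre_ excludes exactly the empty string, on which the Python generator raises IndexError
-- at lines[-1] when first advanced (splitlines('') == []).
def Pre_parseinstr (inp : String) : Prop := inp ≠ ""
instance (inp : String) : Decidable (Pre_parseinstr inp) := by unfold Pre_parseinstr; infer_instance
def pvWitness_parseinstr : String := "a b\n+ *"

def Spec_parseinstr (inp : String) (out : List (List String)) : Prop := out = parseinstr_alt inp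
instance (inp : String) (out : List (List String)) : Decidable (Spec_parseinstr inp out) := by unfold Spec_parseinstr; infer_instance

-- ===== CLAIM (what is proved, stated in full; the proofs are below) =====
def Claim_equal_parseinstr : Prop := ∀ (inp : String), Dom_parseinstr inp → Pre_parseinstr inp → Spec_parseinstr inp (parseinstr inp)

-- ===== LEMMAS AND PROOFS =====

/-- Common normal form both ports are reduced to: slice every line over consecutive
    boundary pairs, the boundaries being 0, the cut positions of `cs`, and `cs.length`. -/
def pvZ (lines : List String) (cs : List Char) : List (List String) :=
  (((0 : Int) :: ((PySem.List.pyRange 1 (cs.length : Int) 1).filter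
        (fun i => decide (PySem.List.pyGet? cs i ≠ some ' ')) ++ [(cs.length : Int)])).zip
      ((PySem.List.pyRange 1 (cs.length : Int) 1).filter
        (fun i => decide (PySem.List.pyGet? cs i ≠ some ' ')) ++ [(cs.length : Int)])).map
    (fun ab => lines.map (fun ln => PySem.Str.slice ln (some ab.1) (some ab.2)))

/-- The stateful cut loop produces exactly the zip of consecutive boundaries. -/
theorem foldl_cuts_eq_zip {β : Type} (g : Int → Int → β) :
    ∀ (cuts : List Int) (j : Int) (acc : List β),
      cuts.foldl (fun (s : Int × List β) i => (i, s.2 ++ [g s.1 i])) (j, acc)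
        = (cuts.getLastD j, acc ++ ((j :: cuts).zip cuts).map (fun ab => g ab.1 ab.2)) := by
  intro cuts
  induction cuts with
  | nil => intro j acc; simp
  | cons c cs ih =>
    intro j acc
    simp only [List.foldl_cons]
    rw [ih c (acc ++ [g j c])]
    cases cs <;> simp [List.getLast?_cons]

/-- Appending the final boundary appends the final pair to the zip. -/
theorem zip_bounds_append (n : Int) :
    ∀ (cuts : List Int) (j : Int),
      ((j :: (cuts ++ [n])).zip (cuts ++ [n]))
        = ((j :: cuts).zip cuts) ++ [(cuts.getLastD j, n)] := by
  intro cuts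
  induction cuts with
  | nil => intro j; simp
  | cons c cs ih =>
    intro j
    simp only [List.cons_append, List.zip_cons_cons, ih c, List.getLastD_cons]

/-- Filtering range(0, n) by (i ≠ 0 ∧ q i) is filtering range(1, n) by q. -/
theorem filter_range_ne_zero (n : Int) (q : Int → Bool) :
    (PySem.List.pyRange 0 n 1).filter (fun i => decide (i ≠ 0) && q i)
      = (PySem.List.pyRange 1 n 1).filter q := by
  by_cases hn : n ≤ 0
  · rw [PySem.List.pyRange_one_eq_nil hn, PySem.List.pyRange_one_eq_nil (by omega)]
    rfl
  · rw [PySem.List.pyRange_one_cons (by omega : (0:Int) < n)]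
    rw [List.filter_cons_of_neg (by simp)]
    apply List.filter_congr
    intro i hi
    have h1 : (1:Int) ≤ i := (PySem.List.mem_pyRange_one.mp hi).1
    simp [show i ≠ 0 by omega]

/-- A's per-index comprehension over range(len(lines)) equals a direct map over lines. -/
theorem map_range_lines {β : Type} (lines : List String) (f : String → β) :
    (PySem.List.pyRange 0 (PySem.List.len lines) 1).map
        (fun k => f (PySem.List.pyGetD lines k "")) = lines.map f := by
  have h := PySem.List.map_pyGetD_pyRange_zero lines ""
  calc (PySem.List.pyRange 0 (PySem.List.len lines) 1).map
          (fun k => f (PySem.List.pyGetD lines k ""))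
      = ((PySem.List.pyRange 0 (PySem.List.len lines) 1).map
          (fun k => PySem.List.pyGetD lines k "")).map f := by rw [List.map_map]; rfl
    _ = lines.map f := by rw [h]

/-- A's some-branch equals the boundary-zip normal form. -/
theorem parseinstr_core (lines : List String) (oprs : String) :
    (let st := (PySem.List.pyRange 0 (PySem.Str.len oprs) 1).foldl
      (fun (s : Int × List (List String)) i =>
        if i ≠ 0 ∧ PySem.Str.pyGet? oprs i ≠ some ' ' then
          (i, s.2 ++ [(PySem.List.pyRange 0 (PySem.List.len lines) 1).map
            (fun k => PySem.Str.slice (PySem.List.pyGetD lines k "") (some s.1) (some i))])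
        else s) (0, [])
     st.2 ++ [(PySem.List.pyRange 0 (PySem.List.len lines) 1).map
      (fun k => PySem.Str.slice (PySem.List.pyGetD lines k "") (some st.1) (some (PySem.Str.len oprs)))])
    = pvZ lines oprs.toList := by
  unfold pvZ
  simp only [PySem.Str.len_eq]
  set n : Int := (oprs.toList.length : Int) with hn
  set g : Int → Int → List String :=
    fun a b => lines.map (fun line => PySem.Str.slice line (some a) (some b)) with hg
  set q : Int → Bool := fun i => decide (PySem.List.pyGet? oprs.toList i ≠ some ' ') with hq
  set cuts := (PySem.List.pyRange 1 n 1).filter q with hcuts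
  have hinner : ∀ a b : Int,
      (PySem.List.pyRange 0 (PySem.List.len lines) 1).map
        (fun k => PySem.Str.slice (PySem.List.pyGetD lines k "") (some a) (some b))
        = g a b := fun a b =>
    map_range_lines lines (fun line => PySem.Str.slice line (some a) (some b))
  simp only [hinner]
  rw [PySem.List.foldl_ite_eq_foldl_filter
      (fun i => i ≠ 0 ∧ PySem.Str.pyGet? oprs i ≠ some ' ')
      (fun (s : Int × List (List String)) i => (i, s.2 ++ [g s.1 i]))]
  have hfilt : ((PySem.List.pyRange 0 n 1).filter
      (fun i => decide (i ≠ 0 ∧ PySem.Str.pyGet? oprs i ≠ some ' '))) = cuts := by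
    rw [hcuts, ← filter_range_ne_zero n q]
    apply List.filter_congr
    intro i _
    simp [hq, PySem.Str.pyGet?_eq]
  rw [hfilt, foldl_cuts_eq_zip g cuts 0 []]
  simp only [List.nil_append]
  rw [zip_bounds_append n cuts 0, List.map_append]
  rfl

/-- xs[0:b] = xs[:b], at the String level. -/
theorem strSlice_zero (ln : String) (b? : Option Int) :
    PySem.Str.slice ln (some 0) b? = PySem.Str.slice ln none b? := by
  apply String.toList_inj.mp
  simp [PySem.Str.toList_slice]

/-- Slice composition: ln[a+w : b+w] = (ln[w:])[a:b] for nonnegative a, b, w. -/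
theorem strSlice_shift (ln : String) (w a b : Int) (hw : 0 ≤ w) (ha : 0 ≤ a) (hb : 0 ≤ b) :
    PySem.Str.slice ln (some (a + w)) (some (b + w))
      = PySem.Str.slice (PySem.Str.slice ln (some w) none) (some a) (some b) := by
  apply String.toList_inj.mp
  simp only [PySem.Str.toList_slice, PySem.Chars.slice_eq_listSlice]
  rw [PySem.List.slice_from _ hw, PySem.List.slice_toNat _ ha hb,
      PySem.List.slice_toNat _ (by omega) (by omega), List.drop_drop]
  have h1 : (a + w).toNat = w.toNat + a.toNat := by omega
  rw [h1]
  congr 1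
  omega

/-- Shifting a unit-step range. -/
theorem pyRange_shift (c : Int) :
    ∀ (k : Nat) (a b : Int), (b - a).toNat = k →
      PySem.List.pyRange (a + c) (b + c) 1 = (PySem.List.pyRange a b 1).map (· + c) := by
  intro k
  induction k with
  | zero =>
    intro a b hk
    rw [PySem.List.pyRange_one_eq_nil (by omega), PySem.List.pyRange_one_eq_nil (by omega)]
    rfl
  | succ m ih =>
    intro a b hk
    rw [PySem.List.pyRange_one_cons (by omega : a < b),
        PySem.List.pyRange_one_cons (by omega : a + c < b + c), List.map_cons,
        show a + c + 1 = (a + 1) + c by ring, ih (a + 1) b (by omega)]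

/-- Every index strictly before the first-cut scan's stop is a space. -/
theorem getSpace (cs : List Char) (i : Nat) (h1 : 1 ≤ i) (h2 : i < pvFindW cs) :
    cs[i]? = some ' ' := by
  unfold pvFindW at h2
  have hlt : i - 1 < ((cs.drop 1).takeWhile (fun c => c == ' ')).length := by omega
  have hget : cs[i]? = (cs.drop 1)[i - 1]? := by
    rw [List.getElem?_drop]
    congr 1
    omega
  rw [hget]
  obtain ⟨t, ht⟩ := List.takeWhile_prefix (l := cs.drop 1) (fun c => c == ' ')
  rw [← ht, List.getElem?_append_left hlt, List.getElem?_eq_getElem hlt]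
  have hp := List.mem_takeWhile_imp (List.getElem_mem hlt)
  simp only [beq_iff_eq] at hp
  rw [hp]

/-- The first-cut scan stops at a non-space (when inside the string). -/
theorem getCut (cs : List Char) (h : pvFindW cs < cs.length) :
    cs[pvFindW cs]? ≠ some ' ' := by
  have hsr := List.takeWhile_append_dropWhile (p := fun c : Char => c == ' ') (l := cs.drop 1)
  have hlen1 : (cs.drop 1).length = cs.length - 1 := List.length_drop
  unfold pvFindW at *
  set tl := (cs.drop 1).takeWhile (fun c => c == ' ') with htl
  set dr := (cs.drop 1).dropWhile (fun c => c == ' ') with hdr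
  have hrne : dr ≠ [] := by
    intro hnil
    rw [hnil, List.append_nil] at hsr
    have h2 : tl.length = (cs.drop 1).length := by rw [hsr]
    omega
  have hhead : (dr.head hrne == ' ') = false := List.head_dropWhile_not _ hrne
  have hget : cs[1 + tl.length]? = (cs.drop 1)[tl.length]? := by
    rw [List.getElem?_drop]
  have hget2 : (cs.drop 1)[tl.length]? = some (dr.head hrne) := by
    rw [← hsr, List.getElem?_append_right le_rfl, Nat.sub_self, ← List.head?_eq_getElem?,
        List.head?_eq_some_head]
  rw [hget, hget2]
  intro hc
  rw [Option.some.inj hc] at hhead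
  simp at hhead

/-- Every boundary of pvZ is nonnegative. -/
theorem bounds_nonneg (cs : List Char) (x : Int)
    (hx : x ∈ (0 : Int) :: (((PySem.List.pyRange 1 (cs.length : Int) 1).filter
        (fun i => decide (PySem.List.pyGet? cs i ≠ some ' '))) ++ [(cs.length : Int)])) :
    0 ≤ x := by
  rcases List.mem_cons.mp hx with h | h
  · omega
  · rcases List.mem_append.mp h with h | h
    · have := (PySem.List.mem_pyRange_one.mp (List.mem_of_mem_filter h)).1
      omega
    · simp only [List.mem_singleton] at h
      subst h
      positivity

/-- pvZ on a string without interior cuts: a single slice to the end. -/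
theorem pvZ_base (cs : List Char) (lines : List String) (h : cs.length ≤ pvFindW cs) :
    pvZ lines cs = [lines.map (fun ln => PySem.Str.slice ln none (some (cs.length : Int)))] := by
  unfold pvZ
  have hcuts : (PySem.List.pyRange 1 (cs.length : Int) 1).filter
      (fun i => decide (PySem.List.pyGet? cs i ≠ some ' ')) = [] := by
    rw [List.filter_eq_nil_iff]
    intro i hi
    have hm := PySem.List.mem_pyRange_one.mp hi
    have hieq : i = ((i.toNat : Nat) : Int) := by omega
    simp only [decide_eq_true_eq, ne_eq, not_not]
    rw [hieq, PySem.List.pyGet?_natCast]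
    exact getSpace cs i.toNat (by omega) (by omega)
  rw [hcuts]
  simp only [List.nil_append, List.zip_cons_cons, List.zip_nil_right, List.map_cons,
    List.map_nil]
  simp only [strSlice_zero]

/-- pvZ on a string with a first interior cut at w: first block, then pvZ of the rest. -/
theorem pvZ_step (cs : List Char) (lines : List String) (h : pvFindW cs < cs.length) :
    pvZ lines cs
      = lines.map (fun ln => PySem.Str.slice ln none (some (pvFindW cs : Int)))
        :: pvZ (lines.map (fun ln => PySem.Str.slice ln (some (pvFindW cs : Int)) none))
               (cs.drop (pvFindW cs)) := by
  have hw1 : 1 ≤ pvFindW cs := Nat.le_add_right 1 _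
  unfold pvZ
  set w : Nat := pvFindW cs with hwdef
  set cs' : List Char := cs.drop w with hcs'
  have hlen' : cs'.length = cs.length - w := by rw [hcs']; exact List.length_drop
  set f : Int → Int := (· + (w : Int)) with hf
  set q : Int → Bool := fun i => decide (PySem.List.pyGet? cs i ≠ some ' ') with hq
  set q' : Int → Bool := fun i => decide (PySem.List.pyGet? cs' i ≠ some ' ') with hq'
  set cuts' := (PySem.List.pyRange 1 (cs'.length : Int) 1).filter q' with hcuts'
  -- the cuts of cs are w followed by the (shifted) cuts of cs'
  have hcuts : (PySem.List.pyRange 1 (cs.length : Int) 1).filter q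
      = (w : Int) :: cuts'.map f := by
    rw [PySem.List.pyRange_one_append 1 (w : Int) (cs.length : Int)
          (by exact_mod_cast hw1) (by exact_mod_cast le_of_lt h),
        List.filter_append]
    have h1 : (PySem.List.pyRange 1 (w : Int) 1).filter q = [] := by
      rw [List.filter_eq_nil_iff]
      intro i hi
      have hm := PySem.List.mem_pyRange_one.mp hi
      have hieq : i = ((i.toNat : Nat) : Int) := by omega
      simp only [hq, decide_eq_true_eq, ne_eq, not_not]
      rw [hieq, PySem.List.pyGet?_natCast]
      exact getSpace cs i.toNat (by omega) (by omega)
    have h2 : PySem.List.pyRange (w : Int) (cs.length : Int) 1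
        = (w : Int) :: PySem.List.pyRange ((w : Int) + 1) (cs.length : Int) 1 :=
      PySem.List.pyRange_one_cons (by exact_mod_cast h)
    have h3 : q (w : Int) = true := by
      simp only [hq, decide_eq_true_eq, ne_eq]
      rw [PySem.List.pyGet?_natCast]
      exact getCut cs h
    have h4 : PySem.List.pyRange ((w : Int) + 1) (cs.length : Int) 1
        = (PySem.List.pyRange 1 (cs'.length : Int) 1).map f := by
      have e1 : ((w : Int) + 1) = 1 + (w : Int) := by ring
      have e2 : (cs.length : Int) = (cs'.length : Int) + (w : Int) := by
        rw [hlen']; omega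
      rw [e1, e2, hf]
      exact pyRange_shift (w : Int) ((cs'.length : Int) - 1).toNat 1 (cs'.length : Int) rfl
    have h5 : (PySem.List.pyRange 1 (cs'.length : Int) 1).filter (q ∘ f) = cuts' := by
      rw [hcuts']
      apply List.filter_congr
      intro i hi
      have hm := PySem.List.mem_pyRange_one.mp hi
      have hieq : i = ((i.toNat : Nat) : Int) := by omega
      simp only [Function.comp_apply, hf, hq, hq']
      rw [hieq]
      have e3 : ((i.toNat : Int) + (w : Int)) = (((i.toNat + w : Nat)) : Int) := by push_cast; ring
      rw [e3, PySem.List.pyGet?_natCast, PySem.List.pyGet?_natCast]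
      have e4 : cs[i.toNat + w]? = cs'[i.toNat]? := by
        rw [hcs', List.getElem?_drop, Nat.add_comm]
      rw [e4]
    rw [h1, List.nil_append, h2, List.filter_cons_of_pos h3, h4, List.filter_map, h5]
  rw [hcuts]
  -- the boundary list of cs is 0 followed by the shifted boundary list of cs'
  have e0 : f 0 = (w : Int) := by rw [hf]; simp
  have en : f (cs'.length : Int) = (cs.length : Int) := by
    rw [hf]; simp only; rw [hlen']; omega
  have e1 : (((w : Int) :: cuts'.map f) ++ [(cs.length : Int)])
      = ((0 : Int) :: (cuts' ++ [(cs'.length : Int)])).map f := by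
    simp only [List.map_cons, List.map_append, List.map_nil, List.cons_append, e0, en]
  have e2 : ((0 : Int) :: (cuts' ++ [(cs'.length : Int)])).map f
      = (w : Int) :: (cuts' ++ [(cs'.length : Int)]).map f := by
    rw [List.map_cons, e0]
  rw [e1, e2, List.zip_cons_cons, ← e2, List.zip_map, List.map_cons, List.map_map]
  congr 1
  apply List.map_congr_left
  intro ab hab
  obtain ⟨ha1, ha2⟩ := List.of_mem_zip hab
  rw [hcuts', hq'] at ha1 ha2
  have hb1 : 0 ≤ ab.1 := bounds_nonneg cs' ab.1 ha1
  have hb2 : 0 ≤ ab.2 := bounds_nonneg cs' ab.2 (List.mem_cons_of_mem _ ha2)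
  cases ab with
  | mk a b =>
    simp only [Function.comp_apply, Prod.map_apply, hf]
    rw [List.map_map]
    apply List.map_congr_left
    intro ln _
    exact strSlice_shift ln (w : Int) a b (by positivity) hb1 hb2

/-- B's consuming recursion equals the boundary-zip normal form. -/
theorem pvGo_eq_pvZ : ∀ (k : Nat) (cs : List Char), cs.length ≤ k →
    ∀ (lines : List String), pvGo lines cs = pvZ lines cs := by
  intro k
  induction k with
  | zero =>
    intro cs hk lines
    have h : cs.length ≤ pvFindW cs := by unfold pvFindW; omega
    rw [pvGo, dif_pos h, pvZ_base cs lines h]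
  | succ m ih =>
    intro cs hk lines
    by_cases h : cs.length ≤ pvFindW cs
    · rw [pvGo, dif_pos h, pvZ_base cs lines h]
    · have hw : 1 ≤ pvFindW cs := Nat.le_add_right 1 _
      rw [pvGo, dif_neg h,
          ih (cs.drop (pvFindW cs)) (by rw [List.length_drop]; omega),
          pvZ_step cs lines (by omega)]

-- ===== VERDICT (by name: the statement is the Claim_ definition above) =====
theorem parseinstr_spec : Claim_equal_parseinstr := by
  intro inp _ _
  unfold Spec_parseinstr
  simp only [parseinstr, parseinstr_alt]
  cases hl : PySem.List.pyGet? (PySem.Str.splitlines inp) (-1) with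
  | none => rfl
  | some oprs =>
    exact (parseinstr_core (PySem.Str.splitlines inp) oprs).trans
      (pvGo_eq_pvZ oprs.toList.length oprs.toList le_rfl (PySem.Str.splitlines inp)).symm
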